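-- pv_equiv track=rewrite | github.com/Alebep/pipelineDensityMapCountAndMeasureFish | src/fish_pipeline/utils/geometry.py | contour_from_mask
-- ===== SOURCE A (Python) =====
-- from typing import Iterable, List, Sequence, Tuple
--
-- def contour_from_mask(mask: Sequence[Sequence[bool]]) -> List[Tuple[int, int]]:
--     points: List[Tuple[int, int]] = []
--     height = len(mask)
--     width = len(mask[0]) if height else 0
--     for y in range(height):
--         for x in range(width):
--             if not mask[y][x]:
--                 continue
--             neighbours = [
--                 (x - 1, y),
--                 (x + 1, y),
--                 (x, y - 1),
--                 (x, y + 1),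
--             ]
--             if any(
--                 nx < 0
--                 or ny < 0
--                 or nx >= width
--                 or ny >= height
--                 or not mask[ny][nx]
--                 for nx, ny in neighbours
--             ):
--                 points.append((x, y))
--     return points
-- ===== SOURCE B (Python) =====
-- from typing import List, Sequence, Tuple
--
-- def contour_from_mask(mask: Sequence[Sequence[bool]]) -> List[Tuple[int, int]]:
--     # Bit-parallel formulation: pack each row into an integer bitmask, compute the
--     # interior by shifting/AND-ing whole rows at once, then emit the bits of
--     # row & ~interior.  No per-cell neighbour inspection anywhere.
--     height = len(mask)
--     width = len(mask[0]) if height else 0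
--     rows = [sum(1 << x for x in range(width) if row[x]) for row in mask]
--     points: List[Tuple[int, int]] = []
--     for y in range(height):
--         r = rows[y]
--         above = rows[y - 1] if y > 0 else 0
--         below = rows[y + 1] if y + 1 < height else 0
--         interior = r & (r << 1) & (r >> 1) & above & below
--         x = 0
--         while r:
--             if (r & 1) and not (interior & 1):
--                 points.append((x, y))
--             r >>= 1
--             interior >>= 1
--             x += 1
--     return points
-- ===== Notes on version B (the rewrite author's own statement) =====
-- stated objective: alternative
-- what changed: B packs each mask row into an integer bitmask and computes the interior of the whole row at once with shifts and ANDs (interior = r & (r<<1) & (r>>1) & above & below), then emits contour points from the bits of the row minus its interior; A instead builds a 4-neighbour list and runs an any() generator per True cell.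
import Mathlib
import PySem

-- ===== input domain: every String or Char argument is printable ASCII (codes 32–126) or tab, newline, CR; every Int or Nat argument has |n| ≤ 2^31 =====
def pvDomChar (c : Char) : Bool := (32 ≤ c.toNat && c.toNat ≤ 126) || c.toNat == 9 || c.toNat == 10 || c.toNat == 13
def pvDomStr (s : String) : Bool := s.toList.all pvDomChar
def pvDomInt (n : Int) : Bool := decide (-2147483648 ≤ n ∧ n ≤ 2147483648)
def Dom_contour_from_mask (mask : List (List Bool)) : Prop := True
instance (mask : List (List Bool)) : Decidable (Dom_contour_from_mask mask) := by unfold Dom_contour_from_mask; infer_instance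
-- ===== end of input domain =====

-- B replaces A's per-cell 4-neighbour tests by a bit-parallel pass: each row is packed
-- into an integer bitmask, the interior is computed by whole-row shifts/ANDs, and the
-- contour bits are emitted from row & ~interior. Pre_ excludes ragged masks with a row
-- shorter than row 0, on which the Python A raises IndexError.


-- ===== PORT A =====
-- mask[ny][nx]; every access the Python performs is in range under Pre_, so the
-- getD default is never consulted there (exact on Pre_).
def pvCellA (mask : List (List Bool)) (ny nx : Int) : Bool :=
  PySem.List.pyGetD (PySem.List.pyGetD mask ny []) nx false

def contour_from_mask (mask : List (List Bool)) : List (Int × Int) :=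
  let height : Int := mask.length
  let width : Int := if mask.length = 0 then 0 else ((mask.headD []).length : Int)
  (PySem.List.pyRange 0 height 1).foldl (fun points y =>
    (PySem.List.pyRange 0 width 1).foldl (fun points x =>
      if !(pvCellA mask y x) then points
      else
        let neighbours : List (Int × Int) := [(x - 1, y), (x + 1, y), (x, y - 1), (x, y + 1)]
        if neighbours.any (fun n =>
            decide (n.1 < 0) || decide (n.2 < 0) || decide (width ≤ n.1) ||
            decide (height ≤ n.2) || !(pvCellA mask n.2 n.1))
        then points ++ [(x, y)]
        else points) points) []

-- ===== PORT B =====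
-- sum(1 << x for x in range(width) if row[x]); row[x] is in range under Pre_,
-- x ≥ 0 in the range so `.toNat` is exact here.
def pvRowBits (width : Int) (row : List Bool) : Nat :=
  ((PySem.List.pyRange 0 width 1).filter (fun x => PySem.List.pyGetD row x false)).foldl
    (fun s x => s + (1 <<< x.toNat)) 0

-- the `while r:` bit-emission loop (r, interior both halved each step)
def pvEmit (y : Int) (r i : Nat) (x : Int) : List (Int × Int) :=
  if r = 0 then []
  else (if r % 2 = 1 ∧ i % 2 = 0 then [(x, y)] else []) ++ pvEmit y (r / 2) (i / 2) (x + 1)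
termination_by r
decreasing_by exact Nat.div_lt_self (Nat.pos_of_ne_zero (by assumption)) (by norm_num)

def contour_from_mask_alt (mask : List (List Bool)) : List (Int × Int) :=
  let height : Int := mask.length
  let width : Int := if mask.length = 0 then 0 else ((mask.headD []).length : Int)
  let rows : List Nat := mask.map (pvRowBits width)
  (PySem.List.pyRange 0 height 1).foldl (fun points y =>
    let r := PySem.List.pyGetD rows y 0
    let above := if 0 < y then PySem.List.pyGetD rows (y - 1) 0 else 0
    let below := if y + 1 < height then PySem.List.pyGetD rows (y + 1) 0 else 0
    let interior := r &&& (r <<< 1) &&& (r >>> 1) &&& above &&& below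
    points ++ pvEmit y r interior 0) []

-- ===== PRECONDITION & SPEC =====
-- Pre_ excludes exactly the ragged masks with some row shorter than row 0: there the
-- Python A raises IndexError (it reads every column index below len(mask[0]) in every row).
def Pre_contour_from_mask (mask : List (List Bool)) : Prop :=
  ∀ row ∈ mask, (mask.headD []).length ≤ row.length
instance (mask : List (List Bool)) : Decidable (Pre_contour_from_mask mask) := by
  unfold Pre_contour_from_mask; infer_instance
def pvWitness_contour_from_mask : List (List Bool) :=
  [[true, true, false], [true, false, true]]
def Spec_contour_from_mask (mask : List (List Bool)) (out : List (Int × Int)) : Prop := out = contour_from_mask_alt mask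
instance (mask : List (List Bool)) (out : List (Int × Int)) : Decidable (Spec_contour_from_mask mask out) := by unfold Spec_contour_from_mask; infer_instance

-- ===== CLAIM (what is proved, stated in full; the proofs are below) =====
def Claim_equal_contour_from_mask : Prop := ∀ (mask : List (List Bool)), Dom_contour_from_mask mask → Pre_contour_from_mask mask → Spec_contour_from_mask mask (contour_from_mask mask)

-- ===== LEMMAS AND PROOFS =====

-- A's per-cell boundary test, extracted as a predicate.
def pvBndA (mask : List (List Bool)) (width height y x : Int) : Bool :=
  pvCellA mask y x &&
  ([((x:Int) - 1, y), (x + 1, y), (x, y - 1), (x, y + 1)].any (fun n =>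
    decide (n.1 < 0) || decide (n.2 < 0) || decide (width ≤ n.1) ||
    decide (height ≤ n.2) || !(pvCellA mask n.2 n.1)))

-- A's inner loop = filter+map of pvBndA over the row.
theorem pvInnerA (mask : List (List Bool)) (width height y : Int) (pts : List (Int × Int)) :
    (PySem.List.pyRange 0 width 1).foldl (fun points x =>
      if !(pvCellA mask y x) then points
      else
        let neighbours : List (Int × Int) := [(x - 1, y), (x + 1, y), (x, y - 1), (x, y + 1)]
        if neighbours.any (fun n =>
            decide (n.1 < 0) || decide (n.2 < 0) || decide (width ≤ n.1) ||
            decide (height ≤ n.2) || !(pvCellA mask n.2 n.1))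
        then points ++ [(x, y)]
        else points) pts
    = pts ++ ((PySem.List.pyRange 0 width 1).filter (pvBndA mask width height y)).map
        (fun x => (x, y)) := by
  rw [PySem.List.foldl_congr_mem'
    (g := fun points x => if pvBndA mask width height y x then points ++ [(x, y)] else points)]
  · exact PySem.List.foldl_append_if _ _ _ _
  · intro x _ acc
    by_cases hc : pvCellA mask y x = true <;>
      simp [pvBndA, hc]

-- bottom-up bit builder: pvN w f has bit k = f k for k < w
def pvN (w : Nat) (f : Nat → Bool) : Nat :=
  match w with
  | 0 => 0
  | w + 1 => (if f 0 then 1 else 0) + 2 * pvN w (fun k => f (k + 1))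

theorem pvN_succ_top (w : Nat) (f : Nat → Bool) :
    pvN (w + 1) f = pvN w f + (if f w then 1 <<< w else 0) := by
  induction w generalizing f with
  | zero => simp [pvN]
  | succ w ih =>
    show (if f 0 then 1 else 0) + 2 * pvN (w + 1) (fun k => f (k + 1)) = _
    rw [ih]
    simp only [pvN, Nat.shiftLeft_eq]
    split_ifs <;> ring

theorem pvRowBits_eq_pvN (w : Nat) (row : List Bool) :
    pvRowBits (w : Int) row = pvN w (fun k => PySem.List.pyGetD row (k : Int) false) := by
  induction w with
  | zero => simp [pvRowBits, pvN, pysem]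
  | succ w ih =>
    unfold pvRowBits at *
    rw [Nat.cast_add, Nat.cast_one,
      PySem.List.pyRange_one_succ_right (by positivity), List.filter_append, List.foldl_append,
      ih, pvN_succ_top]
    simp only [List.filter_cons, List.filter_nil]
    split_ifs with h
    · simp [h]
    · simp [h]

theorem pvN_testBit (w : Nat) (f : Nat → Bool) (k : Nat) :
    (pvN w f).testBit k = (decide (k < w) && f k) := by
  induction k generalizing w f with
  | zero =>
    cases w with
    | zero => simp [pvN]
    | succ w =>
      rw [Nat.testBit_zero]
      show decide (((if f 0 then 1 else 0) + 2 * pvN w _) % 2 = 1) = _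
      split_ifs with h <;> simp [Nat.add_mul_mod_self_left, h]
  | succ k ih =>
    cases w with
    | zero => simp [pvN]
    | succ w =>
      rw [Nat.testBit_add_one]
      show ((((if f 0 then 1 else 0) + 2 * pvN w _) / 2).testBit k) = _
      have : ((if f 0 then 1 else 0) + 2 * pvN w (fun k => f (k + 1))) / 2
          = pvN w (fun k => f (k + 1)) := by split_ifs <;> omega
      rw [this, ih]
      simp [Nat.succ_lt_succ_iff]

-- emission of the bits of pvN w fR, skipping those set in pvN w fI
theorem pvEmit_pvN (y : Int) (w : Nat) (fR fI : Nat → Bool) (x0 : Int) :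
    pvEmit y (pvN w fR) (pvN w fI) x0
      = ((List.range w).filter (fun k => fR k && !fI k)).map
          (fun (k : Nat) => ((x0 + (k : Int), y) : Int × Int)) := by
  induction w generalizing fR fI x0 with
  | zero => simp [pvN, pvEmit]
  | succ w ih =>
    rw [pvEmit]
    by_cases h0 : pvN (w + 1) fR = 0
    · rw [if_pos h0]
      symm
      rw [List.map_eq_nil_iff, List.filter_eq_nil_iff]
      intro k hk
      have hb := pvN_testBit (w + 1) fR k
      rw [h0] at hb
      simp only [Nat.zero_testBit] at hb
      have : fR k = false := by
        rcases List.mem_range.mp hk with hlt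
        simpa [hlt] using hb.symm
      simp [this]
    · rw [if_neg h0]
      have hr2 : pvN (w + 1) fR / 2 = pvN w (fun k => fR (k + 1)) := by
        show ((if fR 0 then 1 else 0) + 2 * _) / 2 = _
        split_ifs <;> omega
      have hi2 : pvN (w + 1) fI / 2 = pvN w (fun k => fI (k + 1)) := by
        show ((if fI 0 then 1 else 0) + 2 * _) / 2 = _
        split_ifs <;> omega
      have hrm : (pvN (w + 1) fR % 2 = 1) ↔ fR 0 = true := by
        show ((if fR 0 then 1 else 0) + 2 * _) % 2 = 1 ↔ _
        split_ifs with h <;> simp [Nat.add_mul_mod_self_left, h]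
      have him : (pvN (w + 1) fI % 2 = 0) ↔ fI 0 = false := by
        show ((if fI 0 then 1 else 0) + 2 * _) % 2 = 0 ↔ _
        split_ifs with h <;> simp [Nat.add_mul_mod_self_left, h]
      rw [hr2, hi2, ih]
      rw [List.range_succ_eq_map]
      simp only [List.filter_cons, List.filter_map, List.map_map, Function.comp_def,
        Nat.succ_eq_add_one]
      by_cases hf : fR 0 = true ∧ fI 0 = false
      · rw [if_pos (by rw [hrm, him]; exact hf), if_pos (by simp [hf.1, hf.2])]
        simp only [List.singleton_append, List.cons_append, List.nil_append]
        congr 1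
        · simp
        · rw [List.map_map]
          apply List.map_congr_left; intro k _
          simp only [Function.comp_apply, Nat.succ_eq_add_one]
          push_cast; ring_nf
      · rw [if_neg (by rw [hrm, him]; exact hf),
          if_neg (by intro hc; exact hf (by revert hc; cases hR : fR 0 <;> cases hI : fI 0 <;> simp))]
        simp only [List.nil_append]
        rw [List.map_map]
        apply List.map_congr_left; intro k _
        simp only [Function.comp_apply, Nat.succ_eq_add_one]
        push_cast; ring_nf

-- ===== VERDICT (by name: the statement is the Claim_ definition above) =====
theorem contour_from_mask_spec : Claim_equal_contour_from_mask := by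
  intro mask _ hpre
  unfold Spec_contour_from_mask
  simp only [contour_from_mask, contour_from_mask_alt]
  rw [PySem.List.foldl_congr_mem'
    (g := fun pts (y : Int) => pts ++
      ((PySem.List.pyRange 0 (if mask.length = 0 then 0 else ((mask.headD []).length : Int)) 1).filter
        (pvBndA mask (if mask.length = 0 then 0 else ((mask.headD []).length : Int)) (mask.length : Int) y)).map
        (fun x => (x, y)))
    (h := fun y _ acc => pvInnerA mask _ _ y acc)]
  rw [PySem.List.foldl_append_eq_flatMap, List.nil_append]
  rw [PySem.List.foldl_append_eq_flatMap, List.nil_append]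
  apply List.flatMap_congr
  intro y hy
  rw [PySem.List.mem_pyRange_one] at hy
  rcases hy with ⟨hy0, hyh⟩
  have hmne : mask ≠ [] := by
    intro h; rw [h] at hyh; simp at hyh; omega
  have hW0 : mask.length ≠ 0 := by simpa [List.length_eq_zero_iff] using hmne
  set w : Nat := (mask.headD []).length with hw
  have hWif : (if mask.length = 0 then (0:Int) else ((mask.headD []).length : Int)) = (w : Int) := by
    rw [if_neg hW0]
  rw [hWif]
  have cellN : ∀ (yy : Int), (0 ≤ yy ∧ yy < (mask.length : Int)) →
      PySem.List.pyGetD (mask.map (pvRowBits (w : Int))) yy 0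
        = pvN w (fun k => pvCellA mask yy (k : Int)) := by
    intro yy hyy
    have hlt : yy < ((List.map (pvRowBits (w : Int)) mask).length : Int) := by simpa using hyy.2
    rw [PySem.List.pyGetD_eq_getElem _ _ hyy.1 hlt, List.getElem_map, pvRowBits_eq_pvN]
    congr 1
    funext k
    unfold pvCellA
    rw [PySem.List.pyGetD_eq_getElem mask [] hyy.1 (by simpa using hyy.2)]
  have hr := cellN y ⟨hy0, hyh⟩
  simp only [hWif, hr]
  set fR : Nat → Bool := fun k => pvCellA mask y (k : Int) with hfR
  set fA : Nat → Bool := fun k => decide (0 < y) && pvCellA mask (y - 1) (k : Int) with hfA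
  set fB : Nat → Bool := fun k => decide (y + 1 < (mask.length : Int)) && pvCellA mask (y + 1) (k : Int) with hfB
  have habove : (if 0 < y then PySem.List.pyGetD (mask.map (pvRowBits (w : Int))) (y - 1) 0 else 0)
      = pvN w fA := by
    split_ifs with h
    · rw [cellN (y - 1) ⟨by omega, by omega⟩]
      apply Nat.eq_of_testBit_eq; intro k
      rw [pvN_testBit, pvN_testBit, hfA]
      simp [h]
    · apply Nat.eq_of_testBit_eq; intro k
      rw [Nat.zero_testBit, pvN_testBit, hfA]
      simp [h]
  have hbelow : (if y + 1 < (mask.length : Int) then PySem.List.pyGetD (mask.map (pvRowBits (w : Int))) (y + 1) 0 else 0)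
      = pvN w fB := by
    split_ifs with h
    · rw [cellN (y + 1) ⟨by omega, by omega⟩]
      apply Nat.eq_of_testBit_eq; intro k
      rw [pvN_testBit, pvN_testBit, hfB]
      simp [h]
    · apply Nat.eq_of_testBit_eq; intro k
      rw [Nat.zero_testBit, pvN_testBit, hfB]
      simp [h]
  rw [habove, hbelow]
  set fI : Nat → Bool := fun k =>
    fR k && (decide (1 ≤ k) && fR (k - 1)) && (decide (k + 1 < w) && fR (k + 1)) && fA k && fB k with hfI
  have hint : pvN w fR &&& (pvN w fR <<< 1) &&& (pvN w fR >>> 1) &&& pvN w fA &&& pvN w fB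
      = pvN w fI := by
    apply Nat.eq_of_testBit_eq; intro k
    simp only [Nat.testBit_and, Nat.testBit_shiftLeft, Nat.testBit_shiftRight]
    rw [show 1 + k = k + 1 from Nat.add_comm 1 k]
    rw [pvN_testBit, pvN_testBit, pvN_testBit, pvN_testBit, pvN_testBit, pvN_testBit, hfI]
    by_cases hk : k < w
    · have hk1 : k - 1 < w := by omega
      simp only [hk, hk1, decide_true, Bool.true_and]
    · simp [hk]
  rw [hint, pvEmit_pvN]
  rw [PySem.List.pyRange_zero_natCast]
  rw [List.filter_map, List.map_map]
  have hpred : ∀ k ∈ List.range w, (pvBndA mask (↑w) (↑mask.length) y ∘ fun (k : Nat) => (k : Int)) k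
      = (fR k && !fI k) := by
    intro k hk
    rw [List.mem_range] at hk
    simp only [Function.comp_apply, pvBndA, List.any_cons, List.any_nil, Bool.or_false,
      hfI, hfA, hfB, hfR]
    have e1 : decide ((k : Int) - 1 < 0) = !decide (1 ≤ k) := by
      by_cases h : 1 ≤ k <;> simp [h] <;> omega
    have e2 : decide ((w : Int) ≤ (k : Int) - 1) = false := by simp; omega
    have e3 : decide ((k : Int) + 1 < 0) = false := by simp; omega
    have e4 : decide ((w : Int) ≤ (k : Int) + 1) = !decide (k + 1 < w) := by
      by_cases h : k + 1 < w <;> simp [h] <;> omega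
    have e5 : decide (y < 0) = false := by simp; omega
    have e6 : decide ((mask.length : Int) ≤ y) = false := by simp; omega
    have e7 : decide (y - 1 < 0) = !decide (0 < y) := by
      by_cases h : (0:Int) < y <;> simp [h] <;> omega
    have e8 : decide ((mask.length : Int) ≤ y - 1) = false := by simp; omega
    have e9 : decide (y + 1 < 0) = false := by simp; omega
    have e10 : decide ((mask.length : Int) ≤ y + 1) = !decide (y + 1 < (mask.length : Int)) := by
      by_cases h : y + 1 < (mask.length : Int) <;> simp [h] <;> omega
    have e11 : decide ((k : Int) < 0) = false := by simp
    have e12 : decide ((w : Int) ≤ (k : Int)) = false := by simp; omega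
    simp only [e1, e2, e3, e4, e5, e6, e7, e8, e9, e10, e11, e12,
      Bool.or_false, Bool.false_or]
    by_cases h1 : 1 ≤ k
    · have hc : ((k : Int) - 1) = (((k - 1 : Nat)) : Int) := by push_cast [h1]; ring
      have hnat : decide (k + 1 < w) = decide ((k : Int) + 1 < (w : Int)) := by
        by_cases h : k + 1 < w <;> simp [h] <;> omega
      rw [hc]
      have hcast : ((k : Int) + 1) = (((k + 1 : Nat)) : Int) := by push_cast; ring
      rw [hcast]
      generalize pvCellA mask y (k : Int) = c
      generalize pvCellA mask y (((k - 1 : Nat)) : Int) = l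
      generalize pvCellA mask y (((k + 1 : Nat)) : Int) = r
      generalize pvCellA mask (y - 1) (k : Int) = u
      generalize pvCellA mask (y + 1) (k : Int) = d
      generalize decide (1 ≤ k) = a
      generalize decide (k + 1 < w) = b
      generalize decide (0 < y) = a2
      generalize decide (y + 1 < (mask.length : Int)) = b2
      revert c l r u d a b a2 b2
      decide
    · have hk0 : k = 0 := by omega
      subst hk0
      simp only [show decide (1 ≤ 0) = false from rfl, Bool.not_false, Bool.false_and,
        Bool.and_false, Bool.true_or, Bool.or_true]
  rw [List.filter_congr hpred]
  apply List.map_congr_left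
  intro k _
  simp
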